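-- pv_equiv track=rewrite | github.com/Aakash326/Sales_forge_IBM | src/ibm_integrations/strategic_agents/compliance_risk_agent.py | _determine_audit_requirements
-- ===== SOURCE A (Python) =====
-- from typing import Dict, List, Optional, Any, Tuple
--
-- def _determine_audit_requirements(applicable_regulations: List[Dict[str, Any]]) -> List[str]:
--     """Determine audit and assessment requirements"""
--
--     requirements = []
--
--     framework_ids = [reg["framework_id"] for reg in applicable_regulations]
--
--     # Standard audit requirements
--     requirements.append("Annual compliance assessment")
--     requirements.append("Quarterly security reviews")
--
--     # Regulation-specific audits
--     if "SOC2" in framework_ids: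
--         requirements.extend(["SOC 2 Type II audit", "Continuous monitoring program"])
--
--     if "ISO27001" in framework_ids:
--         requirements.extend(["ISO 27001 certification audit", "Annual surveillance audits"])
--
--     if "PCI_DSS" in framework_ids:
--         requirements.extend(["PCI DSS assessment", "Quarterly network scans"])
--
--     if any(fid in ["HIPAA", "GDPR"] for fid in framework_ids):
--         requirements.append("Privacy compliance audit")
--
--     return requirements
-- ===== SOURCE B (Python) =====
-- from typing import Dict, List, Optional, Any, Tuple
--
-- def _determine_audit_requirements(applicable_regulations: List[Dict[str, Any]]) -> List[str]:
--     """Determine audit and assessment requirements (single-pass flag accumulation)."""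
--     soc2 = iso = pci = priv = False
--     for reg in applicable_regulations:
--         fid = reg["framework_id"]
--         soc2 = soc2 or fid == "SOC2"
--         iso = iso or fid == "ISO27001"
--         pci = pci or fid == "PCI_DSS"
--         priv = priv or fid == "HIPAA" or fid == "GDPR"
--     return (["Annual compliance assessment", "Quarterly security reviews"]
--             + (["SOC 2 Type II audit", "Continuous monitoring program"] if soc2 else [])
--             + (["ISO 27001 certification audit", "Annual surveillance audits"] if iso else [])
--             + (["PCI DSS assessment", "Quarterly network scans"] if pci else [])
--             + (["Privacy compliance audit"] if priv else []))
-- ===== Notes on version B (the rewrite author's own statement) =====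
-- stated objective: alternative
-- what changed: Instead of materializing the framework-id list and scanning it four separate times with membership tests, B makes one pass over the regulations accumulating four boolean flags and then assembles the result by concatenating the flag-guarded segments.
import Mathlib
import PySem

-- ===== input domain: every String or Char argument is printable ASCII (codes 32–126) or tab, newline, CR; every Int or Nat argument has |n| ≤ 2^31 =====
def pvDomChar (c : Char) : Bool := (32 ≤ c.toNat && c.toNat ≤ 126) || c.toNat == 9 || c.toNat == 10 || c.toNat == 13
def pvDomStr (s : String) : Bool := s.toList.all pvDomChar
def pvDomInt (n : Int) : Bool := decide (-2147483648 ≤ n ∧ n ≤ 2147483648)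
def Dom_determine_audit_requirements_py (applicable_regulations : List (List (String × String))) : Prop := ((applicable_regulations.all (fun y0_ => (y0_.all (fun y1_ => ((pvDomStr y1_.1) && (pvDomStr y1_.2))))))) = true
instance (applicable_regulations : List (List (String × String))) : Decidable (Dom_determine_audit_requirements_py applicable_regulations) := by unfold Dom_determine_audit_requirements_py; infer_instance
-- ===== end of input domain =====

-- B replaces A's framework-id list plus four separate membership scans with a single pass over the
-- regulations accumulating four boolean flags, then concatenates the flag-guarded segments (alternative).

-- ===== PORT A =====
def determine_audit_requirements_py (applicable_regulations : List (List (String × String))) : List String :=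
  let requirements : List String := []
  let framework_ids : List String :=
    applicable_regulations.map (fun reg => ((PySem.Dict.mk reg).get? "framework_id").getD "")
  let requirements := requirements ++ ["Annual compliance assessment"]
  let requirements := requirements ++ ["Quarterly security reviews"]
  let requirements := if framework_ids.contains "SOC2" then
      requirements ++ ["SOC 2 Type II audit", "Continuous monitoring program"] else requirements
  let requirements := if framework_ids.contains "ISO27001" then
      requirements ++ ["ISO 27001 certification audit", "Annual surveillance audits"] else requirements
  let requirements := if framework_ids.contains "PCI_DSS" then
      requirements ++ ["PCI DSS assessment", "Quarterly network scans"] else requirements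
  let requirements := if framework_ids.any (fun fid => (["HIPAA", "GDPR"] : List String).contains fid) then
      requirements ++ ["Privacy compliance audit"] else requirements
  requirements

-- ===== PORT B =====
-- the single for-loop of Source B: fold over the regulations updating the four flags
def pvAuditFlags (applicable_regulations : List (List (String × String))) : Bool × Bool × Bool × Bool :=
  applicable_regulations.foldl
    (fun st reg =>
      let fid := ((PySem.Dict.mk reg).get? "framework_id").getD ""
      (st.1 || fid == "SOC2", st.2.1 || fid == "ISO27001", st.2.2.1 || fid == "PCI_DSS",
       st.2.2.2 || fid == "HIPAA" || fid == "GDPR"))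
    (false, false, false, false)

def determine_audit_requirements_py_alt (applicable_regulations : List (List (String × String))) : List String :=
  let f := pvAuditFlags applicable_regulations
  ["Annual compliance assessment", "Quarterly security reviews"]
    ++ (if f.1 then ["SOC 2 Type II audit", "Continuous monitoring program"] else [])
    ++ (if f.2.1 then ["ISO 27001 certification audit", "Annual surveillance audits"] else [])
    ++ (if f.2.2.1 then ["PCI DSS assessment", "Quarterly network scans"] else [])
    ++ (if f.2.2.2 then ["Privacy compliance audit"] else [])

-- ===== PRECONDITION & SPEC =====
-- Pre_ excludes exactly the inputs where some regulation dict lacks the key "framework_id",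
-- on which the Python A (and B) raises KeyError.
def Pre_determine_audit_requirements_py (applicable_regulations : List (List (String × String))) : Prop :=
  ∀ reg ∈ applicable_regulations, (PySem.Dict.mk reg).contains "framework_id" = true
instance (applicable_regulations : List (List (String × String))) : Decidable (Pre_determine_audit_requirements_py applicable_regulations) := by unfold Pre_determine_audit_requirements_py; infer_instance

def pvWitness_determine_audit_requirements_py : (List (List (String × String))) :=
  [[("framework_id", "SOC2")], [("framework_id", "GDPR")]]

def Spec_determine_audit_requirements_py (applicable_regulations : List (List (String × String))) (out : List String) : Prop := out = determine_audit_requirements_py_alt applicable_regulations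
instance (applicable_regulations : List (List (String × String))) (out : List String) : Decidable (Spec_determine_audit_requirements_py applicable_regulations out) := by unfold Spec_determine_audit_requirements_py; infer_instance

-- ===== CLAIM =====
def Claim_equal_determine_audit_requirements_py : Prop := ∀ (applicable_regulations : List (List (String × String))), Dom_determine_audit_requirements_py applicable_regulations → Pre_determine_audit_requirements_py applicable_regulations → Spec_determine_audit_requirements_py applicable_regulations (determine_audit_requirements_py applicable_regulations)

-- ===== LEMMAS AND PROOFS =====

-- the flag fold computes, relative to any start state, exactly A's four membership tests on the id list
theorem flags_foldl (regs : List (List (String × String))) (s : Bool × Bool × Bool × Bool) :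
    regs.foldl
      (fun st reg =>
        let fid := ((PySem.Dict.mk reg).get? "framework_id").getD ""
        (st.1 || fid == "SOC2", st.2.1 || fid == "ISO27001", st.2.2.1 || fid == "PCI_DSS",
         st.2.2.2 || fid == "HIPAA" || fid == "GDPR")) s
    = (let ids := regs.map (fun reg => ((PySem.Dict.mk reg).get? "framework_id").getD "")
       (s.1 || ids.contains "SOC2", s.2.1 || ids.contains "ISO27001",
        s.2.2.1 || ids.contains "PCI_DSS",
        s.2.2.2 || ids.any (fun fid => fid == "HIPAA" || fid == "GDPR"))) := by
  induction regs generalizing s with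
  | nil => simp
  | cons reg rest ih =>
    simp only [List.foldl_cons, List.map_cons, List.contains_cons, List.any_cons, ih]
    obtain ⟨a, b, c, d⟩ := s
    simp [Bool.or_assoc, BEq.comm]

-- ===== VERDICT =====
theorem determine_audit_requirements_py_spec : Claim_equal_determine_audit_requirements_py := by
  intro regs _ _
  unfold Spec_determine_audit_requirements_py determine_audit_requirements_py
    determine_audit_requirements_py_alt pvAuditFlags
  rw [flags_foldl]
  have h : ∀ (fid : String), ((["HIPAA", "GDPR"] : List String).contains fid)
      = (fid == "HIPAA" || fid == "GDPR") := by
    intro fid; simp [List.contains_cons]; constructor <;> (intro hh; simp_all [BEq.comm])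
  simp only [h, Bool.false_or]
  split_ifs <;> simp
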